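-- pv_equiv track=rewrite | github.com/Trohodon/Contingency-Comparator-v2 | gui/trends_view.py | _find_issue_and_pct_cols
-- ===== SOURCE A (Python) =====
-- def _find_issue_and_pct_cols(header_cells):
--     issue_col = None
--     pct_col = None
--     for idx, txt in enumerate(header_cells):
--         t = txt.lower()
--         if "resulting issue" in t:
--             issue_col = idx
--         if ("percent" in t and "load" in t) or (t.strip() == "percent loading") or ("loading" in t and "percent" in t):
--             pct_col = idx
--     # If exact name not found, try looser matches
--     if pct_col is None:
--         for idx, txt in enumerate(header_cells):
--             t = txt.lower()
--             if "percent" in t: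
--                 pct_col = idx
--                 break
--     return issue_col, pct_col
-- ===== SOURCE B (Python) =====
-- def _find_issue_and_pct_cols(header_cells):
--     issue_col = None
--     pct_strict = None
--     pct_loose = None
--     for idx, txt in enumerate(header_cells):
--         t = txt.lower()
--         if "resulting issue" in t:
--             issue_col = idx
--         if "percent" in t and "load" in t:
--             pct_strict = idx
--         if pct_loose is None and "percent" in t:
--             pct_loose = idx
--     return issue_col, pct_strict if pct_strict is not None else pct_loose
-- ===== Notes on version B (the rewrite author's own statement) =====
-- stated objective: simpler
-- what changed: Replaces A's two passes (main scan plus a conditional second fallback scan for 'percent') and its redundant three-disjunct strict test by one fused pass maintaining issue/strict/loose columns, returning strict-else-loose.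
import Mathlib
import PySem

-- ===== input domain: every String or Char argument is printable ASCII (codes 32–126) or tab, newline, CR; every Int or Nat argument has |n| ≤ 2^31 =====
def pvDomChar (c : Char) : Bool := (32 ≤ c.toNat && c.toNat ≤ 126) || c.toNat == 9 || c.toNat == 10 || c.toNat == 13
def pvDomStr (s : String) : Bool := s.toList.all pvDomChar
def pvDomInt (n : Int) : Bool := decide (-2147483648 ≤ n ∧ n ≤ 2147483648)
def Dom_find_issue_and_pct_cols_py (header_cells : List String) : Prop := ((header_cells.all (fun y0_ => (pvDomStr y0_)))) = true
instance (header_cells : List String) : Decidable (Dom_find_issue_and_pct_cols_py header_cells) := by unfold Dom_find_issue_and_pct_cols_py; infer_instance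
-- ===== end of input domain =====

-- B fuses A's two passes (main scan + conditional fallback scan) into one pass keeping
-- issue/strict/loose columns and drops A's redundant extra strict disjuncts; same return value.

-- ===== PORT A =====
-- A's main loop: one step per (idx, txt), updating (issue_col, pct_col)
def pvAStep (st : Option Int × Option Int) (p : Int × String) : Option Int × Option Int :=
  let t := PySem.Str.lower p.2
  let issue := if PySem.Str.isIn "resulting issue" t then some p.1 else st.1
  let pct :=
    if ((PySem.Str.isIn "percent" t && PySem.Str.isIn "load" t)
        || (PySem.Str.strip t == "percent loading")
        || (PySem.Str.isIn "loading" t && PySem.Str.isIn "percent" t)) then some p.1 else st.2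
  (issue, pct)

-- A's fallback loop with break: first index whose lowered text contains "percent"
def pvAFallback : List (Int × String) → Option Int
  | [] => none
  | p :: rest =>
      if PySem.Str.isIn "percent" (PySem.Str.lower p.2) then some p.1 else pvAFallback rest

def find_issue_and_pct_cols_py (header_cells : List String) : Option Int × Option Int :=
  let st := (PySem.List.enumerate header_cells 0).foldl pvAStep (none, none)
  let pct :=
    match st.2 with
    | some k => some k
    | none => pvAFallback (PySem.List.enumerate header_cells 0)
  (st.1, pct)

-- ===== PORT B =====
-- B's single loop: one step per (idx, txt), updating (issue_col, pct_strict, pct_loose)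
def pvBStep (st : Option Int × Option Int × Option Int) (p : Int × String) :
    Option Int × Option Int × Option Int :=
  let t := PySem.Str.lower p.2
  let issue := if PySem.Str.isIn "resulting issue" t then some p.1 else st.1
  let strict := if PySem.Str.isIn "percent" t && PySem.Str.isIn "load" t then some p.1 else st.2.1
  let loose := if st.2.2.isNone && PySem.Str.isIn "percent" t then some p.1 else st.2.2
  (issue, strict, loose)

def find_issue_and_pct_cols_py_alt (header_cells : List String) : Option Int × Option Int :=
  let st := (PySem.List.enumerate header_cells 0).foldl pvBStep (none, none, none)
  (st.1, if st.2.1.isSome then st.2.1 else st.2.2)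

-- ===== PRECONDITION & SPEC =====
def Spec_find_issue_and_pct_cols_py (header_cells : List String) (out : Option Int × Option Int) : Prop := out = find_issue_and_pct_cols_py_alt header_cells
instance (header_cells : List String) (out : Option Int × Option Int) : Decidable (Spec_find_issue_and_pct_cols_py header_cells out) := by unfold Spec_find_issue_and_pct_cols_py; infer_instance

-- ===== CLAIM (what is proved, stated in full; the proofs are below) =====
def Claim_equal_find_issue_and_pct_cols_py : Prop := ∀ (header_cells : List String), Dom_find_issue_and_pct_cols_py header_cells → Spec_find_issue_and_pct_cols_py header_cells (find_issue_and_pct_cols_py header_cells)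

-- ===== LEMMAS AND PROOFS =====

-- strip only removes a prefix and a suffix, so the stripped string is an infix
lemma strip_infix (s : List Char) : PySem.Chars.strip s <:+: s := by
  unfold PySem.Chars.strip
  have h1 : PySem.Chars.rstrip (PySem.Chars.lstrip s) <+: PySem.Chars.lstrip s := by
    unfold PySem.Chars.rstrip
    rw [← List.reverse_suffix]
    simpa using List.dropWhile_suffix _
  have h2 : PySem.Chars.lstrip s <:+ s := List.dropWhile_suffix _
  exact h1.isInfix.trans h2.isInfix

-- A's three-disjunct strict condition collapses to "percent" ∧ "load"
lemma condA_eq_condB (t : String) :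
    ((PySem.Str.isIn "percent" t && PySem.Str.isIn "load" t)
      || (PySem.Str.strip t == "percent loading")
      || (PySem.Str.isIn "loading" t && PySem.Str.isIn "percent" t))
    = (PySem.Str.isIn "percent" t && PySem.Str.isIn "load" t) := by
  refine Bool.eq_iff_iff.mpr ?_
  simp only [Bool.or_eq_true, Bool.and_eq_true, beq_iff_eq]
  constructor
  · rintro ((h | hs) | h3)
    · exact h
    · -- strip t = "percent loading" implies both substrings occur in t
      have hinf : ("percent loading" : String).toList <:+: t.toList := by
        have h := strip_infix t.toList
        rw [← PySem.Str.toList_strip, hs] at h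
        exact h
      constructor
      · rw [PySem.Str.isIn_iff_infix]
        exact List.IsInfix.trans (by decide) hinf
      · rw [PySem.Str.isIn_iff_infix]
        exact List.IsInfix.trans (by decide) hinf
    · -- "loading" in t implies "load" in t
      obtain ⟨hlo, hp⟩ := h3
      refine ⟨hp, ?_⟩
      rw [PySem.Str.isIn_iff_infix] at hlo ⊢
      exact List.IsInfix.trans (by decide) hlo
  · intro h
    exact Or.inl (Or.inl h)

-- loop fusion: B's fold carries A's fold state plus the first-"percent" index
lemma loop_eq (l : List (Int × String)) :
    ∀ (i p lo : Option Int),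
      l.foldl pvBStep (i, p, lo)
        = ((l.foldl pvAStep (i, p)).1, (l.foldl pvAStep (i, p)).2,
            if lo.isSome then lo else pvAFallback l) := by
  induction l with
  | nil => intro i p lo; cases lo <;> simp [pvAFallback]
  | cons hd tl ih =>
      intro i p lo
      simp only [List.foldl_cons]
      rw [ih]
      have hstep : pvBStep (i, p, lo) hd
          = ((pvAStep (i, p) hd).1, (pvAStep (i, p) hd).2,
              (if lo.isNone && PySem.Str.isIn "percent" (PySem.Str.lower hd.2) then some hd.1 else lo)) := by
        simp only [pvBStep, pvAStep, condA_eq_condB]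
      rw [hstep]
      congr 2
      cases lo with
      | some k => simp only [Option.isNone_some, Bool.false_and, if_neg Bool.false_ne_true,
          Option.isSome_some, if_true, pvAFallback]
      | none =>
          simp only [Option.isNone_none, Bool.true_and, pvAFallback]
          split <;> simp_all

-- ===== VERDICT (by name: the statement is the Claim_ definition above) =====
theorem find_issue_and_pct_cols_py_spec : Claim_equal_find_issue_and_pct_cols_py := by
  intro header_cells _
  unfold Spec_find_issue_and_pct_cols_py
  unfold find_issue_and_pct_cols_py find_issue_and_pct_cols_py_alt
  rw [loop_eq]
  cases h : ((PySem.List.enumerate header_cells 0).foldl pvAStep (none, none)).2 <;> simp [h]
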